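-- pv_equiv track=rewrite | github.com/freaktiful/aoc-2021 | day 10/main.py | check_incomplete_line
-- ===== SOURCE A (Python) =====
-- opening_chars = ['(', '[', '<', '{']
--
-- pairs = {
--     '(': ')',
--     '[': ']',
--     '<': '>',
--     '{': '}'
-- }
--
-- points_part_2 = {
--     ')': 1,
--     ']': 2,
--     '}': 3,
--     '>': 4
-- }
--
-- def calculate_score(sequence):
--     curr_score = 0
--     for char in sequence:
--         curr_score *= 5
--         curr_score += points_part_2[char]
--     return curr_score
--
-- def check_incomplete_line(line):
--     pile = []
--     missing_sequence = []
--     for char in line: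
--         if char in opening_chars:
--             pile.append(char)
--         else:
--             if pile:
--                 pile.pop()
--     while pile:
--         missing_char = pile.pop()
--         missing_sequence.append(pairs[missing_char])
--     return calculate_score(missing_sequence)
-- ===== SOURCE B (Python) =====
-- # Stackless: one right-to-left pass with a pending-closer counter.  The rightmost
-- # unmatched openers are met first (most significant), so the score accumulates by
-- # Horner directly; no pile list, no pop loop, O(1) extra space.
-- points_for_opener = {'(': 1, '[': 2, '<': 4, '{': 3}
--
-- def check_incomplete_line(line):
--     score = 0
--     pending = 0
--     for char in reversed(line):
--         p = points_for_opener.get(char)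
--         if p is None:
--             pending += 1
--         elif pending:
--             pending -= 1
--         else:
--             score = score * 5 + p
--     return score
-- ===== Notes on version B (the rewrite author's own statement) =====
-- stated objective: alternative
-- what changed: B removes the stack and the pop/Horner stage entirely: a single right-to-left pass keeps only a pending-closer counter, and each opener met with no pending closer is an unmatched opener (rightmost = most significant) folded straight into the Horner score, so no pile list, no missing_sequence list and no second loop exist.
import Mathlib
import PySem

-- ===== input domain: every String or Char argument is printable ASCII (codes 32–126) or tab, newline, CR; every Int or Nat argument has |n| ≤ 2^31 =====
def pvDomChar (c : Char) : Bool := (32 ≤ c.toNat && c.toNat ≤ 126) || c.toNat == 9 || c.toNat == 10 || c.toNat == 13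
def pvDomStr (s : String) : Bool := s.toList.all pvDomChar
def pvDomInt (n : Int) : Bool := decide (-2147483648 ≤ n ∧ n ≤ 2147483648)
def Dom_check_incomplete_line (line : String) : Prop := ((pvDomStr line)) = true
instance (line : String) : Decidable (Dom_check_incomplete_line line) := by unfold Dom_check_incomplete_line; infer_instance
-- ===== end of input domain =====

-- B replaces A's stack + pop/Horner stage by a single stackless right-to-left pass
-- with a pending-closer counter (objective: alternative).

-- ===== PORT A =====
def pvOpening : List Char := ['(', '[', '<', '{']

def pvPairs (c : Char) : Char :=
  if c = '(' then ')' else if c = '[' then ']' else if c = '<' then '>' else '}'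

def pvPoints2 (c : Char) : Int :=
  if c = ')' then 1 else if c = ']' then 2 else if c = '}' then 3 else 4

-- calculate_score: Horner-style left fold
def pvCalcScore (seq : List Char) : Int :=
  seq.foldl (fun s c => s * 5 + pvPoints2 c) 0

-- scanning loop; pile represented head-first = top of the Python stack (append/pop at the list end)
def pvScanA : List Char → List Char → List Char
  | pile, [] => pile
  | pile, c :: rest =>
    if c ∈ pvOpening then pvScanA (c :: pile) rest
    else match pile with
      | [] => pvScanA [] rest
      | _ :: t => pvScanA t rest

def check_incomplete_line (line : String) : Int :=
  let pile := pvScanA [] line.toList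
  -- the while-pop loop pops top-first, so missing_sequence = map pairs over the head-top pile
  pvCalcScore (pile.map pvPairs)

-- ===== PORT B =====
def pvPointsOpen (c : Char) : Int :=
  if c = '(' then 1 else if c = '[' then 2 else if c = '<' then 4 else 3

-- one reversed-iteration step: state = (score, pending closers to the right)
def pvStepB (c : Char) (st : Int × Nat) : Int × Nat :=
  if c = '(' ∨ c = '[' ∨ c = '<' ∨ c = '{' then
    match st.2 with
    | 0 => (st.1 * 5 + pvPointsOpen c, 0)
    | n + 1 => (st.1, n)
  else (st.1, st.2 + 1)

-- `for char in reversed(line)` threading (score, pending) = foldr over the char list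
def check_incomplete_line_alt (line : String) : Int :=
  (line.toList.foldr pvStepB (0, 0)).1

-- ===== PRECONDITION & SPEC =====
def Spec_check_incomplete_line (line : String) (out : Int) : Prop := out = check_incomplete_line_alt line
instance (line : String) (out : Int) : Decidable (Spec_check_incomplete_line line out) := by unfold Spec_check_incomplete_line; infer_instance

-- ===== CLAIM (what is proved, stated in full; the proofs are below) =====
def Claim_equal_check_incomplete_line : Prop := ∀ (line : String), Dom_check_incomplete_line line → Spec_check_incomplete_line line (check_incomplete_line line)

-- ===== LEMMAS AND PROOFS =====

theorem pv_pts_eq (c : Char) : pvPoints2 (pvPairs c) = pvPointsOpen c := by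
  unfold pvPairs pvPoints2 pvPointsOpen
  split_ifs <;> simp_all

theorem pvStepB_open0 (c : Char) (s : Int) (h : c = '(' ∨ c = '[' ∨ c = '<' ∨ c = '{') :
    pvStepB c (s, 0) = (s * 5 + pvPointsOpen c, 0) := by simp [pvStepB, h]

theorem pvStepB_openS (c : Char) (s : Int) (n : Nat) (h : c = '(' ∨ c = '[' ∨ c = '<' ∨ c = '{') :
    pvStepB c (s, n + 1) = (s, n) := by simp [pvStepB, h]

theorem pvStepB_close (c : Char) (s : Int) (p : Nat) (h : ¬ (c = '(' ∨ c = '[' ∨ c = '<' ∨ c = '{')) :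
    pvStepB c (s, p) = (s, p + 1) := by simp [pvStepB, h]

-- Horner fold with a nonzero accumulator splits off a power of 5
theorem pv_horner_shift : ∀ (xs : List Char) (a : Int),
    xs.foldl (fun s c => s * 5 + pvPoints2 c) a
      = a * 5 ^ xs.length + xs.foldl (fun s c => s * 5 + pvPoints2 c) 0 := by
  intro xs
  induction xs with
  | nil => intro a; simp
  | cons c t ih =>
    intro a
    simp only [List.foldl_cons, List.length_cons]
    rw [ih (a * 5 + pvPoints2 c), ih (0 * 5 + pvPoints2 c)]
    ring

-- snoc characterisation of A's scanning loop
theorem pv_scanA_snoc : ∀ (l : List Char) (P : List Char) (c : Char),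
    pvScanA P (l ++ [c])
      = if c ∈ pvOpening then c :: pvScanA P l else (pvScanA P l).tail := by
  intro l
  induction l with
  | nil =>
    intro P c
    cases P <;> simp [pvScanA]
  | cons d rest ih =>
    intro P c
    by_cases hd : d ∈ pvOpening
    · simp only [List.cons_append, pvScanA, hd, if_true]
      exact ih (d :: P) c
    · cases P with
      | nil => simp only [List.cons_append, pvScanA, hd, if_false]; exact ih [] c
      | cons h t => simp only [List.cons_append, pvScanA, hd, if_false]; exact ih t c

-- main invariant: the B fold computes the Horner value of the surviving pile
theorem pv_main : ∀ (l : List Char) (s : Int) (p : Nat),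
    (l.foldr pvStepB (s, p)).1
      = s * 5 ^ (((pvScanA [] l).drop p).length)
        + pvCalcScore (((pvScanA [] l).drop p).map pvPairs) := by
  intro l
  induction l using List.reverseRecOn with
  | nil =>
    intro s p
    simp [pvScanA, pvCalcScore]
  | append_singleton l c ih =>
    intro s p
    rw [List.foldr_append, pv_scanA_snoc]
    simp only [List.foldr_cons, List.foldr_nil]
    by_cases hc : c ∈ pvOpening
    · have hc' : c = '(' ∨ c = '[' ∨ c = '<' ∨ c = '{' := by
        simpa [pvOpening] using hc
      simp only [hc, if_true]
      cases p with
      | zero =>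
        rw [pvStepB_open0 c s hc', ih (s * 5 + pvPointsOpen c) 0]
        simp only [List.drop_zero, List.map_cons, List.length_cons, pvCalcScore,
          List.foldl_cons]
        rw [pv_horner_shift (List.map pvPairs (pvScanA [] l)) (0 * 5 + pvPoints2 (pvPairs c))]
        simp only [List.length_map, pv_pts_eq]
        ring
      | succ n =>
        rw [pvStepB_openS c s n hc', ih s n]
        simp only [List.drop_succ_cons]
    · have hc' : ¬ (c = '(' ∨ c = '[' ∨ c = '<' ∨ c = '{') := by
        simpa [pvOpening] using hc
      simp only [hc, if_false]
      rw [pvStepB_close c s p hc', ih s (p + 1)]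
      rw [show (pvScanA [] l).tail.drop p = (pvScanA [] l).drop (p + 1) by
        rw [← List.drop_one, List.drop_drop, Nat.add_comm]]

-- ===== VERDICT (by name: the statement is the Claim_ definition above) =====
theorem check_incomplete_line_spec : Claim_equal_check_incomplete_line := by
  intro line _
  unfold Spec_check_incomplete_line check_incomplete_line check_incomplete_line_alt
  rw [pv_main line.toList 0 0]
  simp
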